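-- pv_equiv track=rewrite | github.com/akakaklolo/learn_python | codeforce/random.py | evaluate
-- ===== SOURCE A (Python) =====
-- def id(c):
--     return ord(c) - ord('A')
--
-- def evaluate(s):
--     t = s[::-1]
--     ans = 0
--     max_id = -1
--     for x in t:
--         i = id(x)
--         if max_id > i:
--             ans -= 10 ** i
--         else:
--             ans += 10 ** i
--         max_id = max(max_id, i)
--     return ans
-- ===== SOURCE B (Python) =====
-- def evaluate(s):
--     return _blocks(list(s))
--
-- def _blocks(t):
--     # Recursive block decomposition: the maximum character's LAST occurrence (index j)
--     # closes a block: inside t[:j+1] every occurrence of the max adds its power and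
--     # every smaller character subtracts its own power (a larger character follows it);
--     # the remainder t[j+1:] is an independent subproblem.
--     if not t:
--         return 0
--     m = max(ord(c) for c in t) - 65
--     j = max(k for k, c in enumerate(t) if ord(c) - 65 == m)
--     block = sum(10 ** m if ord(c) - 65 == m else -10 ** (ord(c) - 65) for c in t[:j + 1])
--     return block + _blocks(t[j + 1:])
-- ===== Notes on version B (the rewrite author's own statement) =====
-- stated objective: alternative
-- what changed: A's fused right-to-left pass with a running maximum is replaced by a recursive block decomposition: find the last occurrence of the maximum character, sum one block (max occurrences add their power, smaller characters subtract theirs), and recurse on the remainder; Pre_ excludes strings containing a character below 'A', where 10**id is a Python float so neither program returns an int.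
-- outside the precondition, e.g. on evaluate(' '): A returns -1e-33, B returns 1e-33; on evaluate('A,ab,c'): A returns 8.9e+33, B returns 8.899999999999999e+33
import Mathlib
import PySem

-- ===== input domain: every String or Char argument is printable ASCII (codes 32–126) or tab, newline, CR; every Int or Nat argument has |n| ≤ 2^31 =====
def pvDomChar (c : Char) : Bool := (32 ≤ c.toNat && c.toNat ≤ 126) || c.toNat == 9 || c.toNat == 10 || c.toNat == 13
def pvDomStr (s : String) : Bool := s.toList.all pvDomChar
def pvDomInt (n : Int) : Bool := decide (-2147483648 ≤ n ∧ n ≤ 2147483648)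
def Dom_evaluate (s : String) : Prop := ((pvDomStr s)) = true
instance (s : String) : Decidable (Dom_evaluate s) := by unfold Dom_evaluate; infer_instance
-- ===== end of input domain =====

-- B replaces A's fused right-to-left running-max pass by a recursive block decomposition
-- at the last occurrence of the maximum character (objective: alternative).

-- ===== PORT A =====
-- id(c) = ord(c) - ord('A')
def pvId (c : Char) : Int := (c.toNat : Int) - 65

-- 10 ** i for the nonnegative exponents admitted by Pre_ (Python yields a float for i < 0)
def pvPow (i : Int) : Int := (10 : Int) ^ i.toNat

-- A's loop over t = s[::-1], state (ans, max_id)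
def evaluate (s : String) : Int :=
  (s.toList.reverse.foldl
    (fun st x =>
      let i := pvId x
      let ans := if st.2 > i then st.1 - pvPow i else st.1 + pvPow i
      (ans, max st.2 i))
    ((0 : Int), (-1 : Int))).1

-- ===== PORT B =====
-- the iterator of 'max(k for k, c in enumerate(t) if ord(c) - 65 == m)'
def pvMaxIdxs (t : List Char) (m : Int) : List Int :=
  ((PySem.List.enumerate t 0).filter (fun p => decide (pvId p.2 = m))).map Prod.fst

-- used by pvBlocks's termination proof only
theorem pvMaxIdxs_nonneg (t : List Char) (m : Int) :
    0 ≤ (PySem.List.max? (pvMaxIdxs t m) (fun y => y)).getD 0 := by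
  cases hj : PySem.List.max? (pvMaxIdxs t m) (fun y => y) with
  | none => simp
  | some j =>
    have hmem := PySem.List.max?_mem hj
    simp only [pvMaxIdxs, List.mem_map, List.mem_filter] at hmem
    obtain ⟨p, ⟨hpe, _⟩, hpj⟩ := hmem
    rw [PySem.List.mem_enumerate_iff] at hpe
    obtain ⟨k, hk, rfl⟩ := hpe
    simp at hpj ⊢
    omega

-- used by pvBlocks's termination proof only
theorem pvSliceLen (t : List Char) (x : Int) (hx : 0 ≤ x) (h : t ≠ []) :
    (PySem.List.slice t (some (x + 1)) none).length < t.length := by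
  rw [PySem.List.slice_from _ (by omega : (0:Int) ≤ x + 1)]
  have hlen : 0 < t.length := List.length_pos_of_ne_nil h
  simp only [List.length_drop]
  omega

-- _blocks(t)
def pvBlocks (t : List Char) : Int :=
  if h : t = [] then 0
  else
    let mx := (PySem.List.max? (t.map (fun c => (c.toNat : Int))) (fun y => y)).getD 0
               -- getD 0: totality guard only — max? is none only for t = []
    let m := mx - 65
    let j := (PySem.List.max? (pvMaxIdxs t m) (fun y => y)).getD 0
               -- getD 0: totality guard only — the maximum is attained, so max? is some
    ((PySem.List.slice t (some 0) (some (j + 1))).map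
        (fun c => if pvId c = m then pvPow m else -pvPow (pvId c))).sum
      + pvBlocks (PySem.List.slice t (some (j + 1)) none)
termination_by t.length
decreasing_by
  exact pvSliceLen t _ (pvMaxIdxs_nonneg t _) h

def evaluate_alt (s : String) : Int := pvBlocks s.toList

-- ===== PRECONDITION & SPEC =====
-- Pre_ excludes strings containing a character below 'A': there id(c) < 0 and 10**id(c)
-- is a Python float, so both programs return floats, not values of the declared int type.
def Pre_evaluate (s : String) : Prop := (s.toList.all (fun c => decide (65 ≤ c.toNat))) = true
instance (s : String) : Decidable (Pre_evaluate s) := by unfold Pre_evaluate; infer_instance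
def pvWitness_evaluate : String := "BAC"

def Spec_evaluate (s : String) (out : Int) : Prop := out = evaluate_alt s
instance (s : String) (out : Int) : Decidable (Spec_evaluate s out) := by unfold Spec_evaluate; infer_instance

-- ===== CLAIM (what is proved, stated in full; the proofs are below) =====
def Claim_equal_evaluate : Prop := ∀ (s : String), Dom_evaluate s → Pre_evaluate s → Spec_evaluate s (evaluate s)

-- ===== LEMMAS AND PROOFS =====
-- running maximum of ids, default -1 (A's max_id after the whole loop)
def pvMx (l : List Char) : Int := (l.map pvId).foldl max (-1)

-- A's accumulated sum, read off the structure of A's loop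
def pvS : List Char → Int
  | [] => 0
  | c :: l => if pvMx l > pvId c then pvS l - pvPow (pvId c) else pvS l + pvPow (pvId c)

theorem foldl_max_max (l : List Int) (a b : Int) :
    l.foldl max (max a b) = max a (l.foldl max b) := by
  induction l generalizing b with
  | nil => rfl
  | cons x l ih => simp only [List.foldl_cons, max_assoc, ih]

theorem pvMx_cons (c : Char) (l : List Char) : pvMx (c :: l) = max (pvId c) (pvMx l) := by
  simp only [pvMx, List.map_cons, List.foldl_cons]
  rw [max_comm (-1) (pvId c), foldl_max_max]

theorem neg_one_le_pvMx (l : List Char) : -1 ≤ pvMx l := by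
  induction l with
  | nil => simp [pvMx]
  | cons c l ih => rw [pvMx_cons]; exact le_trans ih (le_max_right _ _)

theorem pvMx_le (l : List Char) (m : Int) (hm : -1 ≤ m) (h : ∀ c ∈ l, pvId c ≤ m) :
    pvMx l ≤ m := by
  induction l with
  | nil => simpa [pvMx]
  | cons c l ih =>
    rw [pvMx_cons]
    exact max_le (h c (by simp)) (ih (fun c hc => h c (by simp [hc])))

-- A's loop, as a foldr over the unreversed list, computes (pvS, pvMx)
theorem pvFoldr_eq (l : List Char) :
    l.foldr
      (fun x st =>
        let i := pvId x
        let ans := if st.2 > i then st.1 - pvPow i else st.1 + pvPow i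
        (ans, max st.2 i))
      ((0 : Int), (-1 : Int))
    = (pvS l, pvMx l) := by
  induction l with
  | nil => simp [pvS, pvMx]
  | cons c l ih =>
    simp only [List.foldr_cons, ih]
    refine Prod.ext ?_ ?_
    · show (if pvMx l > pvId c then pvS l - pvPow (pvId c) else pvS l + pvPow (pvId c)) = pvS (c :: l)
      rfl
    · show max (pvMx l) (pvId c) = pvMx (c :: l)
      rw [pvMx_cons, max_comm]

theorem pvMx_append (u v : List Char) : pvMx (u ++ v) = max (pvMx u) (pvMx v) := by
  induction u with
  | nil =>
    simp only [List.nil_append]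
    have h0 : pvMx ([] : List Char) = -1 := rfl
    have h1 := neg_one_le_pvMx v
    omega
  | cons c u ih =>
    rw [List.cons_append, pvMx_cons, pvMx_cons, ih, max_assoc]

-- splitting A's sum before a suffix whose maximum id is exactly m
theorem pvS_append (u v : List Char) (m : Int)
    (hu : ∀ c ∈ u, pvId c ≤ m) (hv : pvMx v = m) :
    pvS (u ++ v)
      = (u.map (fun c => if pvId c = m then pvPow m else -pvPow (pvId c))).sum + pvS v := by
  induction u with
  | nil => simp
  | cons c u ih =>
    have hum : ∀ x ∈ u, pvId x ≤ m := fun x hx => hu x (by simp [hx])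
    have hmxu : pvMx u ≤ m := by
      apply pvMx_le
      · have := neg_one_le_pvMx v; omega
      · exact hum
    have hmx : pvMx (u ++ v) = m := by
      rw [pvMx_append, hv, max_eq_right hmxu]
    have hstep : pvS (c :: (u ++ v))
        = (if pvMx (u ++ v) > pvId c then pvS (u ++ v) - pvPow (pvId c)
           else pvS (u ++ v) + pvPow (pvId c)) := rfl
    have hcm := hu c (by simp)
    rw [List.cons_append, hstep, ih hum, List.map_cons, List.sum_cons]
    by_cases hc : pvId c = m
    · rw [if_neg (by omega), if_pos hc, hc]
      omega
    · rw [if_pos (by omega), if_neg hc]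
      omega

-- B's recursion computes A's sum (fuel induction on the length)
theorem pvBlocks_eq_pvS : ∀ (n : Nat) (t : List Char), t.length ≤ n →
    (∀ c ∈ t, 0 ≤ pvId c) → pvBlocks t = pvS t := by
  intro n
  induction n with
  | zero =>
    intro t ht _
    have h0 : t = [] := List.eq_nil_of_length_eq_zero (by omega)
    subst h0
    rw [pvBlocks.eq_def]; simp [pvS]
  | succ n ih =>
    intro t ht hpre
    by_cases h : t = []
    · subst h; rw [pvBlocks.eq_def]; simp [pvS]
    · rw [pvBlocks.eq_def]
      simp only [dif_neg h]
      cases hmx : PySem.List.max? (t.map (fun c => (c.toNat : Int))) (fun y => y) with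
      | none =>
        exfalso
        rw [PySem.List.max?_eq_none_iff, List.map_eq_nil_iff] at hmx
        exact h hmx
      | some mx =>
        simp only [Option.getD_some]
        have hall : ∀ c ∈ t, pvId c ≤ mx - 65 := by
          intro c hc
          have := PySem.List.max?_isMax hmx ((c.toNat : Int)) (List.mem_map_of_mem hc)
          simp [pvId]; omega
        have hex : ∃ (k : Nat) (hk : k < t.length), pvId (t[k]'hk) = mx - 65 := by
          have hmem := PySem.List.max?_mem hmx
          rw [List.mem_map] at hmem
          obtain ⟨c, hc, hcmx⟩ := hmem
          obtain ⟨k, hk, rfl⟩ := List.mem_iff_getElem.mp hc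
          exact ⟨k, hk, by simp [pvId, hcmx]⟩
        obtain ⟨k0, hk0, hk0m⟩ := hex
        cases hj : PySem.List.max? (pvMaxIdxs t (mx - 65)) (fun y => y) with
        | none =>
          exfalso
          rw [PySem.List.max?_eq_none_iff] at hj
          have hin : ((k0 : Int)) ∈ pvMaxIdxs t (mx - 65) := by
            simp only [pvMaxIdxs, List.mem_map, List.mem_filter]
            refine ⟨((k0 : Int), t[k0]'hk0), ⟨?_, by simp [hk0m]⟩, rfl⟩
            rw [PySem.List.mem_enumerate_iff]
            exact ⟨k0, hk0, by simp⟩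
          rw [hj] at hin
          simp at hin
        | some j =>
          simp only [Option.getD_some]
          -- characterize j: the last index carrying the maximum id
          have hjmem := PySem.List.max?_mem hj
          simp only [pvMaxIdxs, List.mem_map, List.mem_filter] at hjmem
          obtain ⟨p, ⟨hpe, hpf⟩, hpj⟩ := hjmem
          rw [PySem.List.mem_enumerate_iff] at hpe
          obtain ⟨kj, hkj, rfl⟩ := hpe
          simp at hpf hpj
          -- j = kj
          have hjmax : ∀ (k : Nat) (hk : k < t.length), pvId (t[k]'hk) = mx - 65 → (k : Int) ≤ (kj : Int) := by
            intro k hk hkm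
            have hin : ((k : Int)) ∈ pvMaxIdxs t (mx - 65) := by
              simp only [pvMaxIdxs, List.mem_map, List.mem_filter]
              refine ⟨((k : Int), t[k]'hk), ⟨?_, by simp [hkm]⟩, rfl⟩
              rw [PySem.List.mem_enumerate_iff]
              exact ⟨k, hk, by simp⟩
            have := PySem.List.max?_isMax hj _ hin
            omega
          -- rewrite the slices
          rw [← hpj]
          have hslice1 : PySem.List.slice t (some 0) (some ((kj : Int) + 1)) = t.take (kj + 1) := by
            rw [PySem.List.slice_zero_start, PySem.List.slice_to _ (by omega : (0:Int) ≤ (kj:Int)+1)]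
            norm_num
          have hslice2 : PySem.List.slice t (some ((kj : Int) + 1)) none = t.drop (kj + 1) := by
            rw [PySem.List.slice_from _ (by omega : (0:Int) ≤ (kj:Int)+1)]
            norm_num
          rw [hslice1, hslice2]
          -- the decomposition t = take kj ++ t[kj] :: drop (kj+1)
          set m := mx - 65 with hmdef
          have hdropPre : ∀ c ∈ t.drop (kj + 1), 0 ≤ pvId c :=
            fun c hc => hpre c (List.mem_of_mem_drop hc)
          have hdroplt : ∀ c ∈ t.drop (kj + 1), pvId c < m := by
            intro c hc
            obtain ⟨i, hi, hceq⟩ := List.mem_iff_getElem.mp hc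
            have hld : (t.drop (kj + 1)).length = t.length - (kj + 1) := by simp
            have hidx : kj + 1 + i < t.length := by omega
            have hle := hall c (List.mem_of_mem_drop hc)
            rcases lt_or_eq_of_le hle with hlt | heq
            · exact hlt
            · exfalso
              have hget : t[kj + 1 + i]'hidx = c := by
                rw [← hceq]
                simp [List.getElem_drop]
              have := hjmax (kj + 1 + i) hidx (by rw [hget, heq])
              omega
          have hIH : pvBlocks (t.drop (kj + 1)) = pvS (t.drop (kj + 1)) := by
            apply ih
            · have hld : (t.drop (kj + 1)).length = t.length - (kj + 1) := by simp
              omega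
            · exact hdropPre
          rw [hIH]
          -- split t and apply pvS_append
          have hsplit : t = t.take kj ++ (t[kj]'hkj :: t.drop (kj + 1)) := by
            conv_lhs => rw [← List.take_append_drop kj t]
            rw [List.drop_eq_getElem_cons hkj]
          have hm0 : 0 ≤ m := by
            have := hpre _ (List.getElem_mem hkj)
            omega
          have hvmx : pvMx (t[kj]'hkj :: t.drop (kj + 1)) = m := by
            rw [pvMx_cons, hpf]
            have : pvMx (t.drop (kj + 1)) ≤ m :=
              pvMx_le _ _ (by omega) (fun c hc => le_of_lt (hdroplt c hc))
            omega
          have hS := pvS_append (t.take kj) (t[kj]'hkj :: t.drop (kj + 1)) m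
            (fun c hc => hall c (List.mem_of_mem_take hc)) hvmx
          rw [← hsplit] at hS
          rw [hS]
          -- head block: take (kj+1) = take kj ++ [t[kj]]
          have htake : t.take (kj + 1) = t.take kj ++ [t[kj]'hkj] := by
            rw [List.take_add_one, List.getElem?_eq_getElem hkj]
            rfl
          rw [htake]
          have hScons : pvS (t[kj]'hkj :: t.drop (kj + 1))
              = pvS (t.drop (kj + 1)) + pvPow (pvId (t[kj]'hkj)) := by
            show (if pvMx (t.drop (kj+1)) > pvId (t[kj]'hkj) then _ else _) = _
            rw [if_neg]
            have : pvMx (t.drop (kj + 1)) ≤ m :=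
              pvMx_le _ _ (by omega) (fun c hc => le_of_lt (hdroplt c hc))
            rw [hpf]; omega
          rw [hScons, hpf]
          simp only [List.map_append, List.sum_append, List.map_cons, List.map_nil,
            List.sum_cons, List.sum_nil]
          omega

-- ===== VERDICT (by name: the statement is the Claim_ definition above) =====
theorem evaluate_spec : Claim_equal_evaluate := by
  intro s _ hpre
  unfold Spec_evaluate evaluate evaluate_alt
  rw [List.foldl_reverse]
  have h := congrArg Prod.fst (pvFoldr_eq s.toList)
  have hb : pvBlocks s.toList = pvS s.toList := by
    apply pvBlocks_eq_pvS s.toList.length _ le_rfl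
    intro c hc
    unfold Pre_evaluate at hpre
    rw [List.all_eq_true] at hpre
    have := hpre c hc
    simp [pvId] at this ⊢
    omega
  rw [hb]
  simpa using h
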